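-- pv_equiv track=rewrite | github.com/A-Saavedra/Codigo-Control-NASM | ImplementacionPython/generador_codigo_control.py | extraer_subcadenas
-- ===== SOURCE A (Python) =====
-- def extraer_subcadenas(llave: str, verhoeffs: str) -> list:
--     subcadenas = []
--     pos = 0
--     for d in verhoeffs:
--         largo = int(d) + 1
--         sub = llave[pos:pos + largo]
--         subcadenas.append(sub)
--         pos += largo
--     return subcadenas
-- ===== SOURCE B (Python) =====
-- def extraer_subcadenas(llave: str, verhoeffs: str) -> list:
--     if not verhoeffs:
--         return []
--     largo = int(verhoeffs[0]) + 1
--     return [llave[:largo]] + extraer_subcadenas(llave[largo:], verhoeffs[1:])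
-- ===== Notes on version B (the rewrite author's own statement) =====
-- stated objective: alternative
-- what changed: B is a structural recursion that peels the key itself: it takes the leading int(d)+1 characters and recurses on the remaining suffix of the key, so no running position or absolute index exists anywhere; A iterates with a pos accumulator and slices at absolute offsets.
import Mathlib
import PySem

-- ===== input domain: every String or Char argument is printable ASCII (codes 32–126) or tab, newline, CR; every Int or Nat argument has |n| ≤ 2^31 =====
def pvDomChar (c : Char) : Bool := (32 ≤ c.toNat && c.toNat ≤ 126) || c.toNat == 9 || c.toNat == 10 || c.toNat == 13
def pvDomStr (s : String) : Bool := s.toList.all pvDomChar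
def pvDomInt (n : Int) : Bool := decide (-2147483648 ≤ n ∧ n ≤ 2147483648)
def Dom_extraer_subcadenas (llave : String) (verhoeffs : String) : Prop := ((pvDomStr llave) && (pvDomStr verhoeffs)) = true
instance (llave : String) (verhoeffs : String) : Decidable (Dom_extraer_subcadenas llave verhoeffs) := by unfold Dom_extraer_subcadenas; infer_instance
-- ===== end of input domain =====

-- B splits by structural recursion that peels the leading int(d)+1 chars off the key and recurses on its suffix, instead of A's loop slicing at absolute offsets with a running position (alternative decomposition).


-- ===== PORT A =====
-- int(d) for a single ASCII digit d (Pre_ guarantees d is a digit) is its numeric value.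
def pvDigitVal (d : Char) : Int := (d.toNat : Int) - 48

def extraer_subcadenas (llave : String) (verhoeffs : String) : List String :=
  (verhoeffs.toList.foldl
    (fun (st : List String × Int) d =>
      let largo : Int := pvDigitVal d + 1
      let sub : String := String.ofList (PySem.List.slice llave.toList (some st.2) (some (st.2 + largo)))
      (st.1 ++ [sub], st.2 + largo))
    ([], 0)).1

-- ===== PORT B =====
-- peel: head = llave[:largo], recurse on (llave[largo:], verhoeffs[1:])
def pvPeel (llave : List Char) (vs : List Char) : List String :=
  match vs with
  | [] => []
  | d :: ds =>
    let largo : Int := pvDigitVal d + 1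
    String.ofList (PySem.List.slice llave none (some largo)) ::
      pvPeel (PySem.List.slice llave (some largo) none) ds

def extraer_subcadenas_alt (llave : String) (verhoeffs : String) : List String :=
  pvPeel llave.toList verhoeffs.toList

-- ===== PRECONDITION & SPEC =====
-- Pre_ excludes exactly the inputs where A raises ValueError (int(d) on a non-digit character); B raises there too.
def Pre_extraer_subcadenas (llave : String) (verhoeffs : String) : Prop :=
  verhoeffs.toList.all Char.isDigit = true
instance (llave : String) (verhoeffs : String) : Decidable (Pre_extraer_subcadenas llave verhoeffs) := by unfold Pre_extraer_subcadenas; infer_instance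
def pvWitness_extraer_subcadenas : String × String := ("abc", "2")

def Spec_extraer_subcadenas (llave : String) (verhoeffs : String) (out : List String) : Prop := out = extraer_subcadenas_alt llave verhoeffs
instance (llave : String) (verhoeffs : String) (out : List String) : Decidable (Spec_extraer_subcadenas llave verhoeffs out) := by unfold Spec_extraer_subcadenas; infer_instance

-- ===== CLAIM (what is proved, stated in full; the proofs are below) =====
def Claim_equal_extraer_subcadenas : Prop := ∀ (llave : String) (verhoeffs : String), Dom_extraer_subcadenas llave verhoeffs → Pre_extraer_subcadenas llave verhoeffs → Spec_extraer_subcadenas llave verhoeffs (extraer_subcadenas llave verhoeffs)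

-- ===== LEMMAS AND PROOFS =====

-- reference form of A: direct recursion with an absolute position
def pvSplitFrom (llave : List Char) (vs : List Char) (pos : Int) : List String :=
  match vs with
  | [] => []
  | d :: ds =>
    String.ofList (PySem.List.slice llave (some pos) (some (pos + (pvDigitVal d + 1)))) ::
      pvSplitFrom llave ds (pos + (pvDigitVal d + 1))

lemma foldA_eq (llave : List Char) (vs : List Char) (acc : List String) (pos : Int) :
    (vs.foldl
      (fun (st : List String × Int) d =>
        let largo : Int := pvDigitVal d + 1
        let sub : String := String.ofList (PySem.List.slice llave (some st.2) (some (st.2 + largo)))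
        (st.1 ++ [sub], st.2 + largo))
      (acc, pos)).1 = acc ++ pvSplitFrom llave vs pos := by
  induction vs generalizing acc pos with
  | nil => simp [pvSplitFrom]
  | cons d ds ih => simp [pvSplitFrom, List.foldl, ih]

lemma digit_val_nonneg {d : Char} (h : d.isDigit = true) : 0 ≤ pvDigitVal d := by
  simp [Char.isDigit, UInt32.le_iff_toNat_le] at h
  unfold pvDigitVal
  have : d.toNat = d.val.toNat := rfl
  omega

lemma split_eq_peel (llave : List Char) (vs : List Char) (pos : Int)
    (h0 : 0 ≤ pos) (hd : vs.all Char.isDigit = true) :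
    pvSplitFrom llave vs pos = pvPeel (llave.drop pos.toNat) vs := by
  induction vs generalizing pos with
  | nil => simp [pvSplitFrom, pvPeel]
  | cons d ds ih =>
    simp only [List.all_cons, Bool.and_eq_true] at hd
    have hdv : 0 ≤ pvDigitVal d := digit_val_nonneg hd.1
    have hl : 0 ≤ pvDigitVal d + 1 := by omega
    unfold pvSplitFrom pvPeel
    have hhead :
        PySem.List.slice llave (some pos) (some (pos + (pvDigitVal d + 1)))
          = PySem.List.slice (llave.drop pos.toNat) none (some (pvDigitVal d + 1)) := by
      rw [PySem.List.slice_toNat llave h0 (by omega), PySem.List.slice_to _ hl]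
      congr 1
      omega
    have htail :
        PySem.List.slice (llave.drop pos.toNat) (some (pvDigitVal d + 1)) none
          = llave.drop (pos + (pvDigitVal d + 1)).toNat := by
      rw [PySem.List.slice_from _ hl, List.drop_drop]
      congr 1
      omega
    rw [hhead, ih (pos + (pvDigitVal d + 1)) (by omega) hd.2]
    simp only []
    rw [htail]

-- ===== VERDICT (by name: the statement is the Claim_ definition above) =====
theorem extraer_subcadenas_spec : Claim_equal_extraer_subcadenas := by
  intro llave verhoeffs _ hpre
  unfold Spec_extraer_subcadenas extraer_subcadenas extraer_subcadenas_alt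
  rw [foldA_eq, split_eq_peel llave.toList verhoeffs.toList 0 le_rfl hpre]
  simp
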